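-- pv_equiv track=rewrite | github.com/JorG96/PythonGraphs | IsCorrectlyCut.py | solution
-- ===== SOURCE A (Python) =====
-- def solution(adj):
--     allNeighbors = [set(j for j, b in enumerate(row) if b) for row in adj]
--     for neighbors in allNeighbors:
--         neighbors2 = set()
--         for n in neighbors:
--             neighbors2 |= allNeighbors[n]
--
--         if neighbors.intersection(neighbors2) or len(neighbors.union(neighbors2)) != len(adj) - 1:
--             return False
--
--     return True
-- ===== SOURCE B (Python) =====
-- def solution(adj):
--     # materialize the successor relation as an explicit list of ordered pairs
--     edges = [(i, j) for i, row in enumerate(adj) for j, b in enumerate(row) if b]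
--     # group edges by source vertex, then compose the relation with itself
--     # (length-2 walks = a join of the edge relation on the middle vertex)
--     succ = {}
--     for a, b in edges:
--         succ.setdefault(a, []).append(b)
--     one = set(edges)
--     two = {(a, d) for a, b in edges for d in succ.get(b, ())}
--     if not one.isdisjoint(two):
--         return False
--     cover = one | two
--     n = len(adj)
--     return all(sum((i, j) in cover for j in range(n)) == n - 1 for i in range(n))
-- ===== Notes on version B (the rewrite author's own statement) =====
-- stated objective: alternative
-- what changed: B materializes the successor relation as a global edge list, composes it with itself by a join on the middle vertex (grouping edges by source), and then runs one global disjointness test on the two relations plus a per-cell coverage count, instead of A's per-vertex loop that unions neighbor sets on the fly and checks each vertex with an early return.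
-- outside the precondition, e.g. on solution([[1, 0], [0, 0, 9]]): A returns False, B returns False; on solution([[0, 0, 1]]): A raises IndexError, B returns True
import Mathlib
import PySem

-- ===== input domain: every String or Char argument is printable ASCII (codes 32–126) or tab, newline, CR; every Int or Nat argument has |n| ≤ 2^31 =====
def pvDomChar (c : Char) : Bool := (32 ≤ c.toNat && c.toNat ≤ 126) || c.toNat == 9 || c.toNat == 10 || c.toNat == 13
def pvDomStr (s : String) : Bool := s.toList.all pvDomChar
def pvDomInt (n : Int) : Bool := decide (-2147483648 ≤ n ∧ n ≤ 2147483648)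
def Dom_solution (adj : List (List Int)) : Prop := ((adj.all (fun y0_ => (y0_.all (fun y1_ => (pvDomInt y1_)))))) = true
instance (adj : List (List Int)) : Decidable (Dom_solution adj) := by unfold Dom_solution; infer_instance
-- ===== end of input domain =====

-- B materializes the edge relation as a global list of pairs, composes it with itself by a
-- join on the middle vertex (edges grouped by source), and checks one global disjointness test
-- plus per-cell coverage counts, instead of A's per-vertex on-the-fly neighbor-set unions (alternative).


-- ===== PORT A =====
-- set(j for j, b in enumerate(row) if b)
def rowSet (row : List Int) : PySem.Set Int :=
  PySem.Set.ofList (((PySem.List.enumerate row).filter (fun p => p.2 != 0)).map Prod.fst)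

-- the 'for neighbors in allNeighbors' loop with its early 'return False'
def loopA (allN : List (PySem.Set Int)) (c : Int) : List (PySem.Set Int) → Bool
  | [] => true
  | nb :: rest =>
    let n2 := nb.foldl
      (fun acc k => PySem.Set.union acc (PySem.List.pyGetD allN k PySem.Set.empty)) PySem.Set.empty
    if PySem.Set.inter nb n2 ≠ [] ∨ PySem.Set.len (PySem.Set.union nb n2) ≠ c - 1 then false
    else loopA allN c rest

def solution (adj : List (List Int)) : Bool :=
  let allN := adj.map rowSet
  loopA allN (PySem.List.len adj) allN

-- ===== PORT B =====
-- edges = [(i, j) for i, row in enumerate(adj) for j, b in enumerate(row) if b]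
def edgesB (adj : List (List Int)) : List (Int × Int) :=
  (PySem.List.enumerate adj).flatMap (fun p =>
    ((PySem.List.enumerate p.2).filter (fun q => q.2 != 0)).map (fun q => (p.1, q.1)))

-- succ = {}; for a, b in edges: succ.setdefault(a, []).append(b)
def succB (edges : List (Int × Int)) : PySem.Dict Int (List Int) :=
  edges.foldl (fun d p => d.modify p.1 [] (fun l => l ++ [p.2])) PySem.Dict.empty

-- one = set(edges)
def oneB (adj : List (List Int)) : PySem.Set (Int × Int) := PySem.Set.ofList (edgesB adj)

-- two = {(a, d) for a, b in edges for d in succ.get(b, ())}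
def twoB (adj : List (List Int)) : PySem.Set (Int × Int) :=
  PySem.Set.ofList ((edgesB adj).flatMap
    (fun p => ((succB (edgesB adj)).getD p.2 []).map (fun d => (p.1, d))))

def solution_alt (adj : List (List Int)) : Bool :=
  if !(PySem.Set.isdisjoint (oneB adj) (twoB adj)) then false
  else
    (List.range adj.length).all (fun i : Nat =>
      decide ((((List.range adj.length).countP
        (fun j : Nat => decide (((i : Int), (j : Int)) ∈ PySem.Set.union (oneB adj) (twoB adj)))) : Int)
          = (adj.length : Int) - 1))

-- ===== PRECONDITION & SPEC =====
-- Pre_ excludes matrices with a nonzero entry in a column ≥ len(adj): there A's allNeighbors[n]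
-- raises IndexError unless an earlier vertex already failed a check and returned False.
def Pre_solution (adj : List (List Int)) : Prop :=
  ∀ row ∈ adj, ∀ j < row.length, row.getD j 0 ≠ 0 → j < adj.length
instance (adj : List (List Int)) : Decidable (Pre_solution adj) := by unfold Pre_solution; infer_instance

def pvWitness_solution : List (List Int) := [[0, 1], [1, 0]]

def Spec_solution (adj : List (List Int)) (out : Bool) : Prop := out = solution_alt adj
instance (adj : List (List Int)) (out : Bool) : Decidable (Spec_solution adj out) := by unfold Spec_solution; infer_instance

-- ===== CLAIM (what is proved, stated in full; the proofs are below) =====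
def Claim_equal_solution : Prop := ∀ (adj : List (List Int)), Dom_solution adj → Pre_solution adj → Spec_solution adj (solution adj)

-- ===== LEMMAS AND PROOFS =====

-- A's per-vertex check, as a predicate (used to turn the early-exit loop into List.all)
def bodyA (allN : List (PySem.Set Int)) (c : Int) (nb : PySem.Set Int) : Bool :=
  let n2 := nb.foldl
    (fun acc k => PySem.Set.union acc (PySem.List.pyGetD allN k PySem.Set.empty)) PySem.Set.empty
  !(decide (PySem.Set.inter nb n2 ≠ []) || decide (PySem.Set.len (PySem.Set.union nb n2) ≠ c - 1))

-- A's neighbors2 for a given neighbor set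
def n2A (adj : List (List Int)) (nb : PySem.Set Int) : PySem.Set Int :=
  nb.foldl (fun acc k => PySem.Set.union acc (PySem.List.pyGetD (adj.map rowSet) k PySem.Set.empty))
    PySem.Set.empty

lemma mem_rowSet (row : List Int) (x : Int) :
    x ∈ rowSet row ↔ ∃ j : Nat, j < row.length ∧ row.getD j 0 ≠ 0 ∧ x = (j : Int) := by
  simp only [rowSet, PySem.Set.mem_ofList, List.mem_map, List.mem_filter,
    PySem.List.mem_enumerate_iff]
  constructor
  · rintro ⟨⟨a, b⟩, ⟨⟨k, hk, hp⟩, hb⟩, rfl⟩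
    obtain ⟨rfl, rfl⟩ := Prod.mk.injEq .. ▸ hp
    exact ⟨k, hk, by simpa [List.getD_eq_getElem?_getD, List.getElem?_eq_getElem hk] using hb, by simp⟩
  · rintro ⟨j, hj, hne, rfl⟩
    exact ⟨((j : Int), row[j]), ⟨⟨j, hj, by simp⟩,
      by simpa [List.getD_eq_getElem?_getD, List.getElem?_eq_getElem hj] using hne⟩, rfl⟩

lemma nodup_rowSet (row : List Int) : (rowSet row).Nodup := PySem.Set.nodup_ofList _

lemma mem_foldl_union {g : Int → PySem.Set Int} (l : List Int) (acc : PySem.Set Int) (x : Int) :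
    x ∈ l.foldl (fun acc k => PySem.Set.union acc (g k)) acc ↔ x ∈ acc ∨ ∃ k ∈ l, x ∈ g k := by
  induction l generalizing acc with
  | nil => simp
  | cons a t ih =>
    simp only [List.foldl_cons, ih, PySem.Set.mem_union, List.mem_cons]
    constructor
    · rintro (((h | h) | ⟨k, hk, hx⟩))
      · exact Or.inl h
      · exact Or.inr ⟨a, Or.inl rfl, h⟩
      · exact Or.inr ⟨k, Or.inr hk, hx⟩
    · rintro (h | ⟨k, (rfl | hk), hx⟩)
      · exact Or.inl (Or.inl h)
      · exact Or.inl (Or.inr hx)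
      · exact Or.inr ⟨k, hk, hx⟩

-- a Nodup list of Int whose members are all casts of naturals below n has
-- length = the number of j < n with ↑j in the list
lemma len_eq_countP (l : List Int) (n : Nat) (hnd : l.Nodup)
    (hb : ∀ x ∈ l, ∃ j : Nat, j < n ∧ x = (j : Int)) :
    (l.length : Int) = ((List.range n).countP (fun (j : Nat) => decide ((j : Int) ∈ l)) : Int) := by
  have hperm : l.Perm (((List.range n).filter (fun (j : Nat) => decide ((j : Int) ∈ l))).map
      (fun j : Nat => (j : Int))) := by
    rw [List.perm_ext_iff_of_nodup hnd
      ((List.nodup_range.filter _).map (fun a b h => by exact_mod_cast h))]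
    intro x
    simp only [List.mem_map, List.mem_filter, List.mem_range, decide_eq_true_eq]
    constructor
    · intro hx
      obtain ⟨j, hj, rfl⟩ := hb x hx
      exact ⟨j, ⟨hj, hx⟩, rfl⟩
    · rintro ⟨j, ⟨hj, hx⟩, rfl⟩
      exact hx
  rw [List.countP_eq_length_filter]
  exact_mod_cast (hperm.length_eq.trans (List.length_map ..))

lemma loopA_eq_all (allN : List (PySem.Set Int)) (c : Int) (l : List (PySem.Set Int)) :
    loopA allN c l = l.all (bodyA allN c) := by
  induction l with
  | nil => rfl
  | cons nb rest ih =>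
    rw [loopA, List.all_cons, ← ih, bodyA]
    split_ifs with h
    · rcases h with h | h <;> simp only [PySem.Set.empty, PySem.Set.len] at h <;> simp [h]
    · rw [not_or, not_not, not_not] at h
      obtain ⟨h1, h2⟩ := h
      simp only [PySem.Set.empty, PySem.Set.len] at h1 h2
      simp [h1, h2]

-- membership in the edge list
lemma mem_edgesB (adj : List (List Int)) (x y : Int) :
    (x, y) ∈ edgesB adj ↔
      ∃ (i : Nat) (hi : i < adj.length), x = (i : Int) ∧ y ∈ rowSet (adj[i]'hi) := by
  simp only [edgesB, List.mem_flatMap, PySem.List.mem_enumerate_iff]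
  constructor
  · rintro ⟨p, ⟨i, hi, hp⟩, hmem⟩
    subst hp
    simp only [List.mem_map, List.mem_filter] at hmem
    obtain ⟨q, ⟨hq, hb⟩, hxy⟩ := hmem
    obtain ⟨rfl, rfl⟩ := Prod.mk.injEq .. ▸ hxy
    refine ⟨i, hi, by simp, ?_⟩
    rw [rowSet, PySem.Set.mem_ofList]
    exact List.mem_map.2 ⟨q, List.mem_filter.2 ⟨hq, hb⟩, rfl⟩
  · rintro ⟨i, hi, rfl, hy⟩
    rw [rowSet, PySem.Set.mem_ofList] at hy
    obtain ⟨q, hq, rfl⟩ := List.mem_map.1 hy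
    refine ⟨((0 : Int) + i, adj[i]), ⟨i, hi, rfl⟩, ?_⟩
    refine List.mem_map.2 ⟨q, hq, ?_⟩
    simp

-- looking up the grouped successor dict
lemma mem_succB (edges : List (Int × Int)) (b d : Int) :
    d ∈ (succB edges).getD b [] ↔ (b, d) ∈ edges := by
  rw [succB, PySem.Dict.getD_foldl_modify_append, PySem.Dict.getD_empty]
  simp only [List.nil_append, List.mem_map, List.mem_filter, beq_iff_eq]
  constructor
  · rintro ⟨⟨a, c⟩, ⟨hp, h1⟩, h2⟩
    simp only at h1 h2
    subst h1; subst h2; exact hp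
  · intro h
    exact ⟨(b, d), ⟨h, rfl⟩, rfl⟩

-- the joined list = the composed relation
lemma mem_twoListB (adj : List (List Int)) (x y : Int) :
    (x, y) ∈ (edgesB adj).flatMap
        (fun p => ((succB (edgesB adj)).getD p.2 []).map (fun d => (p.1, d)))
      ↔ ∃ b, (x, b) ∈ edgesB adj ∧ (b, y) ∈ edgesB adj := by
  simp only [List.mem_flatMap, List.mem_map]
  constructor
  · rintro ⟨⟨a, b⟩, hab, d, hd, h⟩
    obtain ⟨rfl, rfl⟩ := Prod.mk.injEq .. ▸ h
    exact ⟨b, hab, (mem_succB _ _ _).1 hd⟩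
  · rintro ⟨b, h1, h2⟩
    exact ⟨(x, b), h1, ⟨y, (mem_succB _ _ _).2 h2, rfl⟩⟩

-- with Pre_, every neighbor index is a natural below len(adj)
lemma rowSet_bound (adj : List (List Int)) (hpre : Pre_solution adj)
    (m : Nat) (hm : m < adj.length) :
    ∀ x ∈ rowSet (adj[m]'hm), ∃ j : Nat, j < adj.length ∧ x = (j : Int) := by
  intro x hx
  obtain ⟨j, hj, hne, rfl⟩ := (mem_rowSet _ _).1 hx
  exact ⟨j, hpre _ (List.getElem_mem hm) j hj hne, rfl⟩

-- membership in A's neighbors2 (uses Pre_ to resolve the allNeighbors[n] lookups)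
lemma mem_n2A (adj : List (List Int)) (hpre : Pre_solution adj)
    (i : Nat) (hi : i < adj.length) (x : Int) :
    x ∈ n2A adj (rowSet (adj[i]'hi)) ↔
      ∃ (k : Nat) (hk : k < adj.length), ((k : Int)) ∈ rowSet (adj[i]'hi) ∧ x ∈ rowSet (adj[k]'hk) := by
  have hgetd : ∀ (k : Nat) (hk : k < adj.length),
      PySem.List.pyGetD (adj.map rowSet) ((k : Int)) PySem.Set.empty = rowSet (adj[k]'hk) := by
    intro k hk
    rw [PySem.List.pyGetD_natCast]
    simp [List.getD_eq_getElem?_getD, List.getElem?_map, List.getElem?_eq_getElem hk]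
  rw [n2A, mem_foldl_union]
  constructor
  · rintro (h | ⟨k, hk, hx⟩)
    · cases h
    · obtain ⟨k', hk', rfl⟩ := rowSet_bound adj hpre i hi k hk
      rw [hgetd k' hk'] at hx
      exact ⟨k', hk', hk, hx⟩
  · rintro ⟨k, hk, hmem, hx⟩
    refine Or.inr ⟨(k : Int), hmem, ?_⟩
    rwa [hgetd k hk]

-- one's members at source i are exactly i's neighbors
lemma mem_oneB (adj : List (List Int)) (i : Nat) (hi : i < adj.length) (y : Int) :
    ((i : Int), y) ∈ oneB adj ↔ y ∈ rowSet (adj[i]'hi) := by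
  rw [oneB, PySem.Set.mem_ofList, mem_edgesB]
  constructor
  · rintro ⟨i', hi', hx, hy⟩
    have : i = i' := by exact_mod_cast hx
    subst this; exact hy
  · intro hy; exact ⟨i, hi, rfl, hy⟩

-- two's members at source i are exactly i's neighbors2 (uses Pre_)
lemma mem_twoB (adj : List (List Int)) (hpre : Pre_solution adj)
    (i : Nat) (hi : i < adj.length) (y : Int) :
    ((i : Int), y) ∈ twoB adj ↔ y ∈ n2A adj (rowSet (adj[i]'hi)) := by
  rw [twoB, PySem.Set.mem_ofList, mem_twoListB, mem_n2A adj hpre i hi]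
  constructor
  · rintro ⟨b, h1, h2⟩
    obtain ⟨k, hk, hx, hy⟩ := (mem_edgesB _ _ _).1 h2
    subst hx
    have hnb : ((k : Int)) ∈ rowSet (adj[i]'hi) := by
      obtain ⟨i', hi', hx', hb⟩ := (mem_edgesB _ _ _).1 h1
      have : i = i' := by exact_mod_cast hx'
      subst this; exact hb
    exact ⟨k, hk, hnb, hy⟩
  · rintro ⟨k, hk, hnb, hy⟩
    exact ⟨(k : Int), (mem_edgesB _ _ _).2 ⟨i, hi, rfl, hnb⟩, (mem_edgesB _ _ _).2 ⟨k, hk, rfl, hy⟩⟩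

-- the union's size as B's per-cell coverage count (uses Pre_ for the bound)
lemma cover_count (adj : List (List Int)) (hpre : Pre_solution adj)
    (i : Nat) (hi : i < adj.length) :
    PySem.Set.len (PySem.Set.union (rowSet (adj[i]'hi)) (n2A adj (rowSet (adj[i]'hi)))) =
      (((List.range adj.length).countP
        (fun j : Nat => decide (((i : Int), (j : Int)) ∈ PySem.Set.union (oneB adj) (twoB adj)))) : Int) := by
  set nb := rowSet (adj[i]'hi)
  set n2 := n2A adj nb
  have hndu : (PySem.Set.union nb n2).Nodup := PySem.Set.nodup_union _ _ (nodup_rowSet _)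
  have hbndu : ∀ x ∈ PySem.Set.union nb n2, ∃ j : Nat, j < adj.length ∧ x = (j : Int) := by
    intro x hx
    rcases (PySem.Set.mem_union ..).1 hx with h | h
    · exact rowSet_bound adj hpre i hi x h
    · obtain ⟨k, hk, _, hx⟩ := (mem_n2A adj hpre i hi x).1 h
      exact rowSet_bound adj hpre k hk x hx
  have hcc : (List.range adj.length).countP (fun j : Nat => decide ((j : Int) ∈ PySem.Set.union nb n2))
      = (List.range adj.length).countP
        (fun j : Nat => decide (((i : Int), (j : Int)) ∈ PySem.Set.union (oneB adj) (twoB adj))) := by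
    apply List.countP_congr
    intro j hj
    rw [List.mem_range] at hj
    simp only [decide_eq_true_eq, PySem.Set.mem_union]
    rw [mem_oneB adj i hi, mem_twoB adj hpre i hi]
  show ((PySem.Set.union nb n2).length : Int) = _
  rw [len_eq_countP _ adj.length hndu hbndu, hcc]

-- the global disjointness test ↔ every per-vertex intersection is empty (uses Pre_)
lemma disjoint_bridge (adj : List (List Int)) (hpre : Pre_solution adj) :
    (PySem.Set.isdisjoint (oneB adj) (twoB adj) = true) ↔
      ∀ (i : Nat) (hi : i < adj.length),
        PySem.Set.inter (rowSet (adj[i]'hi)) (n2A adj (rowSet (adj[i]'hi))) = [] := by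
  rw [PySem.Set.isdisjoint_iff]
  constructor
  · intro h i hi
    rw [List.eq_nil_iff_forall_not_mem]
    intro y hy
    obtain ⟨h1, h2⟩ := (PySem.Set.mem_inter ..).1 hy
    exact h ((i : Int), y) ((mem_oneB adj i hi y).2 h1) ((mem_twoB adj hpre i hi y).2 h2)
  · rintro h ⟨x, y⟩ hp hp2
    have hx := hp
    rw [oneB, PySem.Set.mem_ofList] at hx
    obtain ⟨i, hi, rfl, hy⟩ := (mem_edgesB _ _ _).1 hx
    have h2 := (mem_twoB adj hpre i hi y).1 hp2
    have := h i hi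
    rw [List.eq_nil_iff_forall_not_mem] at this
    exact this y ((PySem.Set.mem_inter ..).2 ⟨hy, h2⟩)

theorem solution_eq_alt (adj : List (List Int)) (hpre : Pre_solution adj) :
    solution adj = solution_alt adj := by
  rw [solution, loopA_eq_all, PySem.List.len_eq, List.all_map]
  by_cases hdis : PySem.Set.isdisjoint (oneB adj) (twoB adj) = true
  · rw [solution_alt, hdis]
    simp only [Bool.not_true, Bool.false_eq_true, if_false]
    have hint := (disjoint_bridge adj hpre).1 hdis
    rw [Bool.eq_iff_iff]
    simp only [List.all_eq_true, List.mem_range, Function.comp]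
    constructor
    · intro h i hi
      have hb := h adj[i] (List.getElem_mem hi)
      rw [bodyA] at hb
      simp only [Bool.not_eq_eq_eq_not, Bool.not_true, Bool.or_eq_false_iff,
        decide_eq_false_iff_not, not_not] at hb
      have hlen := hb.2
      rw [decide_eq_true_eq, ← cover_count adj hpre i hi]
      exact hlen
    · intro h row hrow
      obtain ⟨i, hi, rfl⟩ := List.mem_iff_getElem.1 hrow
      rw [bodyA]
      simp only [Bool.not_eq_eq_eq_not, Bool.not_true, Bool.or_eq_false_iff,
        decide_eq_false_iff_not, not_not]
      refine ⟨hint i hi, ?_⟩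
      have := h i hi
      rw [decide_eq_true_eq, ← cover_count adj hpre i hi] at this
      exact this
  · have hdis' : PySem.Set.isdisjoint (oneB adj) (twoB adj) = false := by
      rwa [Bool.not_eq_true] at hdis
    rw [solution_alt, hdis']
    simp only [Bool.not_false, if_true]
    rw [List.all_eq_false]
    have hex : ∃ (i : Nat) (hi : i < adj.length), ∃ y,
        y ∈ rowSet (adj[i]'hi) ∧ y ∈ n2A adj (rowSet (adj[i]'hi)) := by
      by_contra hno
      push Not at hno
      refine hdis ((disjoint_bridge adj hpre).2 (fun i hi => ?_))
      rw [List.eq_nil_iff_forall_not_mem]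
      intro y hy
      obtain ⟨h1, h2⟩ := (PySem.Set.mem_inter ..).1 hy
      exact hno i hi y h1 h2
    obtain ⟨i, hi, y, h1, h2⟩ := hex
    refine ⟨adj[i], List.getElem_mem hi, ?_⟩
    simp only [Function.comp_apply, Bool.not_eq_true]
    rw [bodyA]
    simp only [Bool.not_eq_false', Bool.or_eq_true, decide_eq_true_eq]
    left
    intro hnil
    rw [List.eq_nil_iff_forall_not_mem] at hnil
    exact hnil y ((PySem.Set.mem_inter ..).2 ⟨h1, h2⟩)

-- ===== VERDICT (by name: the statement is the Claim_ definition above) =====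
theorem solution_spec : Claim_equal_solution := by
  intro adj _ hpre
  unfold Spec_solution
  exact solution_eq_alt adj hpre
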